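-- pv_equiv track=rewrite | github.com/JulienLaboure/SutomSolver | sutom_solver.py | word_pair_to_int
-- ===== SOURCE A (Python) =====
-- def word_pair_to_int(word, solution):
--     processed_word = list(word)
--     processed_solution = list(solution)
--
--     colors = ['w' for i in range(len(word))]
--
--     for position in range(len(word)):
--         if processed_word[position] == processed_solution[position]:
--             colors[position] = 'r'
--             processed_solution[position] = '@'
--
--     for position in range(len(word)):
--         if colors[position] != 'r':
--             for position2 in range(len(solution)):
--                 if position != position2 and processed_word[position] == processed_solution[position2]:
--                     colors[position] = 'y'
--                     processed_solution[position2] = '@'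
--
--     code = 0
--     for position in range(1, len(word)):
--         if colors[position] == 'r':
--             code += 2 * (3**(position - 1))
--         elif colors[position] == 'y':
--             code += (3**(position - 1))
--
--     return code
-- ===== SOURCE B (Python) =====
-- def word_pair_to_int(word, solution):
--     n = len(word)
--     # letters of the solution at non-green positions (presence is all that matters:
--     # a match consumes every remaining copy of the letter at once)
--     avail = set()
--     for q, ch in enumerate(solution):
--         if not (q < n and word[q] == ch):
--             avail.add(ch)
--     code = 0
--     power = 1  # 3**(p-1) once p >= 1
--     consumed = set()
--     for p, ch in enumerate(word):
--         if ch == solution[p]: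
--             digit = 2
--         elif ch in avail and ch not in consumed:
--             digit = 1
--             consumed.add(ch)
--         else:
--             digit = 0
--         if p >= 1:
--             code += digit * power
--             power *= 3
--     return code
-- ===== Notes on version B (the rewrite author's own statement) =====
-- stated objective: faster
-- what changed: A rescans and mutates a copy of the solution for every word letter (nested loops); B builds one presence set of non-green solution letters and a consumed set, computing the base-3 code in a single fused pass (a match in A wipes every remaining copy of a letter, so presence is all the state needed).
-- outside the precondition, e.g. on word_pair_to_int('a@', 'ab'): A returns 1, B returns 0
import Mathlib
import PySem

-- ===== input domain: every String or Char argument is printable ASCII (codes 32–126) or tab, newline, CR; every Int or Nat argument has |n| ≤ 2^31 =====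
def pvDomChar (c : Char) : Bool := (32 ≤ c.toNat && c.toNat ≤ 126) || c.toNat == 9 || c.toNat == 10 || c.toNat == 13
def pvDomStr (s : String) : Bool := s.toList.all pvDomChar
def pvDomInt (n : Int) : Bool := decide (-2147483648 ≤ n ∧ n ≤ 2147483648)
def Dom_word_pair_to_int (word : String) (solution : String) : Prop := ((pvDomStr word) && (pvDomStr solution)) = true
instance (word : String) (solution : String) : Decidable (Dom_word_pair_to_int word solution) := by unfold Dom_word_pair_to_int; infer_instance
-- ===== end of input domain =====

set_option maxRecDepth 2048


-- B replaces A's quadratic wipe-and-rescan of the solution by one presence set of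
-- non-green solution letters plus a consumed set, in a single fused pass (a match in A
-- wipes every remaining copy of a letter, so presence is all the state that matters).

-- ===== PORT A =====
-- Literal transliteration of A.  Loops 'for i in range(k)' become foldl over List.range k
-- (range(1, n) is (List.range n).drop 1); every index taken from a range is a Nat known to
-- be in bounds wherever Python does not raise, so xs[i] / xs[i] = v are List.getD / List.set.
def word_pair_to_int (word : String) (solution : String) : Int :=
  let pw := word.toList
  let n := pw.length
  let m := solution.toList.length
  let st1 := (List.range n).foldl (fun (st : List Char × List Char) i =>
      if pw.getD i ' ' = st.2.getD i ' ' then (st.1.set i 'r', st.2.set i '@') else st)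
    (List.replicate n 'w', solution.toList)
  let st2 := (List.range n).foldl (fun (st : List Char × List Char) p =>
      if st.1.getD p ' ' ≠ 'r' then
        (List.range m).foldl (fun (st : List Char × List Char) q =>
            if p ≠ q ∧ pw.getD p ' ' = st.2.getD q ' ' then (st.1.set p 'y', st.2.set q '@') else st) st
      else st) st1
  ((List.range n).drop 1).foldl (fun (code : Int) pos =>
      if st2.1.getD pos ' ' = 'r' then code + 2 * 3 ^ (pos - 1)
      else if st2.1.getD pos ' ' = 'y' then code + 3 ^ (pos - 1) else code) 0

-- ===== PORT B =====
-- Literal transliteration of Source B: avail = set of solution letters at non-green positions,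
-- then one pass over enumerate(word) carrying (code, power, consumed).
def word_pair_to_int_alt (word : String) (solution : String) : Int :=
  let w := word.toList
  let s := solution.toList
  let n := w.length
  let avail := (PySem.List.enumerate s).foldl
      (fun (acc : PySem.Set Char) qc =>
        if ¬ (qc.1 < (n : Int) ∧ PySem.List.pyGetD w qc.1 ' ' = qc.2) then PySem.Set.add acc qc.2
        else acc)
      PySem.Set.empty
  let st := (PySem.List.enumerate w).foldl
      (fun (st : Int × Int × PySem.Set Char) pc =>
        let t : Int × PySem.Set Char :=
          if pc.2 = PySem.List.pyGetD s pc.1 ' ' then (2, st.2.2)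
          else if PySem.Set.contains avail pc.2 ∧ ¬ PySem.Set.contains st.2.2 pc.2 then
            (1, PySem.Set.add st.2.2 pc.2)
          else (0, st.2.2)
        if 1 ≤ pc.1 then (st.1 + t.1 * st.2.1, st.2.1 * 3, t.2) else (st.1, st.2.1, t.2))
      ((0 : Int), (1 : Int), (PySem.Set.empty : PySem.Set Char))
  st.1

-- ===== PRECONDITION & SPEC =====
-- Pre_ excludes (a) len(word) > len(solution), where A raises IndexError (B raises there too),
-- and (b) words containing '@': '@' is A's in-band sentinel for consumed solution slots, so a
-- literal '@' in the word can match already-consumed slots — an artefact value nobody would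
-- specify; B treats '@' as an ordinary letter there.
def Pre_word_pair_to_int (word : String) (solution : String) : Prop :=
  word.toList.length ≤ solution.toList.length ∧ '@' ∉ word.toList
instance (word : String) (solution : String) : Decidable (Pre_word_pair_to_int word solution) := by
  unfold Pre_word_pair_to_int; infer_instance

def pvWitness_word_pair_to_int : String × String := ("raise", "arise")

def Spec_word_pair_to_int (word : String) (solution : String) (out : Int) : Prop := out = word_pair_to_int_alt word solution
instance (word : String) (solution : String) (out : Int) : Decidable (Spec_word_pair_to_int word solution out) := by unfold Spec_word_pair_to_int; infer_instance

-- ===== CLAIM (what is proved, stated in full; the proofs are below) =====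
def Claim_equal_word_pair_to_int : Prop := ∀ (word : String) (solution : String), Dom_word_pair_to_int word solution → Pre_word_pair_to_int word solution → Spec_word_pair_to_int word solution (word_pair_to_int word solution)

-- ===== LEMMAS AND PROOFS =====

-- The common static description of the colour of position p.
-- gB: p is green; occB c p: some non-green position before p holds letter c;
-- availB c: the solution holds c at some non-green slot; yB: p is yellow.
def gB (w s : List Char) (q : Nat) : Bool := decide (q < w.length) && (w.getD q ' ' == s.getD q ' ')
def occB (w s : List Char) (c : Char) (p : Nat) : Bool :=
  (List.range p).any (fun p' => !gB w s p' && (w.getD p' ' ' == c))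
def availB (w s : List Char) (c : Char) : Bool :=
  (List.range s.length).any (fun q => !gB w s q && (s.getD q ' ' == c))
def yB (w s : List Char) (p : Nat) : Bool :=
  !gB w s p && !occB w s (w.getD p ' ') p && availB w s (w.getD p ' ')
def digitSpec (w s : List Char) (p : Nat) : Int :=
  if gB w s p then 2 else if yB w s p then 1 else 0
def codeSpec (w s : List Char) : Int :=
  ((List.range w.length).drop 1).foldl (fun code p => code + digitSpec w s p * 3 ^ (p - 1)) 0

-- state of A's colours after loop 1 overlaid with yellows decided before position p
def colSpec (w s : List Char) (p : Nat) : List Char :=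
  (List.range w.length).map (fun q => if gB w s q then 'r' else if q < p ∧ yB w s q = true then 'y' else 'w')
-- state of A's processed_solution after greens are masked and positions before p processed
def psSpec (w s : List Char) (p : Nat) : List Char :=
  (List.range s.length).map (fun q =>
    if gB w s q || occB w s (s.getD q ' ') p then '@' else s.getD q ' ')

lemma getD_self_map (l : List Char) : (List.range l.length).map (fun q => l.getD q ' ') = l := by
  apply List.ext_getElem
  · simp
  · intro i h1 h2
    simp [List.getD_eq_getElem?_getD, List.getElem?_eq_getElem h2]

lemma set_map_range {f : Nat → Char} {m i : Nat} (x : Char) (_hi : i < m) :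
    ((List.range m).map f).set i x = (List.range m).map (fun q => if q = i then x else f q) := by
  apply List.ext_getElem
  · simp
  · intro j hj _
    simp only [List.length_set, List.length_map, List.length_range] at hj
    simp only [List.getElem_set, List.getElem_map, List.getElem_range]
    by_cases hij : i = j <;> simp [hij, eq_comm]

lemma getD_map_range' {f : Nat → Char} {m i : Nat} (h : i < m) :
    ((List.range m).map f).getD i ' ' = f i := PySem.List.getD_map_range f m i ' ' h

-- ---------- A side ----------

lemma loop1_spec (w s : List Char) (hlen : w.length ≤ s.length) :
    (List.range w.length).foldl (fun (st : List Char × List Char) i =>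
        if w.getD i ' ' = st.2.getD i ' ' then (st.1.set i 'r', st.2.set i '@') else st)
      (List.replicate w.length 'w', s) = (colSpec w s 0, psSpec w s 0) := by
  have main : ∀ k, k ≤ w.length →
      (List.range k).foldl (fun (st : List Char × List Char) i =>
          if w.getD i ' ' = st.2.getD i ' ' then (st.1.set i 'r', st.2.set i '@') else st)
        ((List.range w.length).map (fun _ => 'w'), (List.range s.length).map (fun q => s.getD q ' '))
        = ((List.range w.length).map (fun q => if q < k ∧ gB w s q = true then 'r' else 'w'),
           (List.range s.length).map (fun q => if q < k ∧ gB w s q = true then '@' else s.getD q ' ')) := by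
    intro k hk
    induction k with
    | zero => simp
    | succ k ih =>
      rw [List.range_succ, List.foldl_append, ih (Nat.le_of_succ_le hk)]
      have hkw : k < w.length := hk
      have hks : k < s.length := lt_of_lt_of_le hkw hlen
      have hgetD : ((List.range s.length).map
          (fun q => if q < k ∧ gB w s q = true then '@' else s.getD q ' ')).getD k ' ' = s.getD k ' ' := by
        rw [getD_map_range' hks]; simp
      simp only [List.foldl_cons, List.foldl_nil, hgetD]
      by_cases hg : gB w s k = true
      · have hcond : w.getD k ' ' = s.getD k ' ' := by
          unfold gB at hg
          have := (Bool.and_eq_true _ _).mp hg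
          simpa using this.2
        rw [if_pos hcond]
        refine Prod.ext ?_ ?_ <;> simp only
        · rw [set_map_range _ hkw]
          refine List.map_congr_left (fun q hq => ?_)
          by_cases hqk : q = k
          · subst hqk; simp [hg]
          · have h2 : (q ≤ k ∧ gB w s q = true) ↔ (q < k ∧ gB w s q = true) := by
              constructor
              · rintro ⟨h1, h3⟩; exact ⟨by omega, h3⟩
              · rintro ⟨h1, h3⟩; exact ⟨by omega, h3⟩
            simp [hqk, h2]
        · rw [set_map_range _ hks]
          refine List.map_congr_left (fun q hq => ?_)
          by_cases hqk : q = k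
          · subst hqk; simp [hg]
          · have h2 : (q ≤ k ∧ gB w s q = true) ↔ (q < k ∧ gB w s q = true) := by
              constructor
              · rintro ⟨h1, h3⟩; exact ⟨by omega, h3⟩
              · rintro ⟨h1, h3⟩; exact ⟨by omega, h3⟩
            simp [hqk, h2]
      · have hcond : ¬ (w.getD k ' ' = s.getD k ' ') := by
          intro hEq; exact hg (by unfold gB; rw [hEq]; simp [hkw])
        rw [if_neg hcond]
        have h2 : ∀ q, (q ≤ k ∧ gB w s q = true) ↔ (q < k ∧ gB w s q = true) := by
          intro q
          constructor
          · rintro ⟨h1, h3⟩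
            rcases Nat.lt_or_ge q k with h | h
            · exact ⟨h, h3⟩
            · have : q = k := by omega
              subst this; exact absurd h3 hg
          · rintro ⟨h1, h3⟩; exact ⟨by omega, h3⟩
        refine Prod.ext ?_ ?_ <;> simp only <;>
          exact List.map_congr_left (fun q hq => by simp [h2 q])
  have h0 : (List.replicate w.length 'w') = (List.range w.length).map (fun _ => 'w') := by
    simp [List.map_const']
  rw [h0]
  conv_lhs => rw [← getD_self_map s]
  rw [main w.length le_rfl]
  unfold colSpec psSpec occB
  refine Prod.ext ?_ ?_ <;> simp only
  · refine List.map_congr_left (fun q hq => ?_)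
    have hqn : q < w.length := List.mem_range.mp hq
    by_cases hg : gB w s q = true <;> simp [hg, hqn]
  · refine List.map_congr_left (fun q hq => ?_)
    by_cases hg : gB w s q = true
    · have hqw : q < w.length := by
        unfold gB at hg
        exact of_decide_eq_true ((Bool.and_eq_true _ _).mp hg).1
      simp [hg, hqw]
    · simp [hg]

-- '@'-mask of solution slot q before word position p is processed, and 'slot q matches w[p]'
def wBm (w s : List Char) (p q : Nat) : Bool := gB w s q || occB w s (s.getD q ' ') p
def mtcB (w s : List Char) (p q : Nat) : Bool := !wBm w s p q && (s.getD q ' ' == w.getD p ' ')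

lemma cond_step (w s : List Char) (p j q : Nat) (hmf : q = j → mtcB w s p q = false) :
    (wBm w s p q || (decide (q < j + 1) && mtcB w s p q))
      = (wBm w s p q || (decide (q < j) && mtcB w s p q)) := by
  by_cases hqj : q = j
  · subst hqj; rw [hmf rfl]; simp
  · have hd : decide (q < j + 1) = decide (q < j) := by
      by_cases h1 : q < j
      · simp [h1, Nat.lt_succ_of_lt h1]
      · have h2 : ¬ q < j + 1 := by omega
        simp [h1, h2]
    rw [hd]

lemma mask_step (w s : List Char) (p j : Nat) (hmf : mtcB w s p j = false) :
    (List.range s.length).map (fun q =>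
        if wBm w s p q || (decide (q < j + 1) && mtcB w s p q) then '@' else s.getD q ' ')
      = (List.range s.length).map (fun q =>
        if wBm w s p q || (decide (q < j) && mtcB w s p q) then '@' else s.getD q ' ') := by
  refine List.map_congr_left fun q _ => ?_
  rw [cond_step w s p j q (fun h => h ▸ hmf)]

lemma occ_succ (w s : List Char) (c : Char) (p : Nat) :
    occB w s c (p+1) = (occB w s c p || (!gB w s p && (w.getD p ' ' == c))) := by
  unfold occB
  rw [List.range_succ, List.any_append]
  simp

lemma beq_comm_char (a b : Char) : (a == b) = (b == a) := by
  by_cases h : a = b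
  · simp [h]
  · simp [h, Ne.symm h]

lemma cond_final (w s : List Char) (p q : Nat) (hg : gB w s p = false) (hq' : q < s.length) :
    (wBm w s p q || (decide (q < s.length) && mtcB w s p q))
      = (gB w s q || occB w s (s.getD q ' ') (p+1)) := by
  have hstep : occB w s (s.getD q ' ') (p+1)
      = (occB w s (s.getD q ' ') p || (!gB w s p && (w.getD p ' ' == s.getD q ' '))) := by
    unfold occB
    rw [List.range_succ, List.any_append]
    simp
  rw [hstep]
  unfold mtcB
  by_cases hwq : wBm w s p q = true
  · rw [hwq]
    unfold wBm at hwq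
    rcases (Bool.or_eq_true _ _).mp hwq with h | h
    · rw [h]; simp
    · rw [h]; simp
  · have hwq' : wBm w s p q = false := eq_false_of_ne_true hwq
    rw [hwq']
    unfold wBm at hwq'
    obtain ⟨hgq, hoccq⟩ := Bool.or_eq_false_iff.mp hwq'
    rw [hgq, hoccq, hg]
    simp only [Bool.false_or, Bool.not_false, Bool.true_and, decide_eq_true hq']
    exact beq_comm_char _ _

lemma inner_spec (w s : List Char) (hlen : w.length ≤ s.length) (hat : '@' ∉ w)
    (p : Nat) (hp : p < w.length) (hg : gB w s p = false) :
    (List.range s.length).foldl (fun (st : List Char × List Char) q =>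
        if p ≠ q ∧ w.getD p ' ' = st.2.getD q ' ' then (st.1.set p 'y', st.2.set q '@') else st)
      (colSpec w s p, psSpec w s p) = (colSpec w s (p+1), psSpec w s (p+1)) := by
  have hps : p < s.length := lt_of_lt_of_le hp hlen
  have hcat : w.getD p ' ' ≠ '@' := by
    intro hEq
    apply hat
    rw [← hEq]
    rw [List.getD_eq_getElem w ' ' hp]
    exact List.getElem_mem hp
  have main : ∀ j, j ≤ s.length →
      (List.range j).foldl (fun (st : List Char × List Char) q =>
          if p ≠ q ∧ w.getD p ' ' = st.2.getD q ' ' then (st.1.set p 'y', st.2.set q '@') else st)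
        (colSpec w s p, psSpec w s p)
      = ((if (List.range j).any (mtcB w s p) then (colSpec w s p).set p 'y' else colSpec w s p),
         (List.range s.length).map (fun q =>
           if wBm w s p q || (decide (q < j) && mtcB w s p q) then '@' else s.getD q ' ')) := by
    intro j hj
    induction j with
    | zero =>
      refine Prod.ext ?_ ?_ <;> simp [psSpec, wBm]
    | succ j ih =>
      rw [List.range_succ, List.foldl_append, ih (Nat.le_of_succ_le hj)]
      have hjs : j < s.length := hj
      have hgetD : ((List.range s.length).map (fun q =>
            if wBm w s p q || (decide (q < j) && mtcB w s p q) then '@' else s.getD q ' ')).getD j ' '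
          = (if wBm w s p j then '@' else s.getD j ' ') := by
        rw [getD_map_range' hjs]; simp
      simp only [List.foldl_cons, List.foldl_nil, hgetD]
      by_cases hw : wBm w s p j = true
      · have hcond : ¬ (p ≠ j ∧ w.getD p ' ' = (if wBm w s p j then '@' else s.getD j ' ')) := by
          rw [if_pos hw]; rintro ⟨-, h2⟩; exact hcat h2
        rw [if_neg hcond]
        have hm : mtcB w s p j = false := by unfold mtcB; simp [hw]
        refine Prod.ext ?_ ?_ <;> simp only
        · rw [List.any_append]; simp [hm]
        · exact (mask_step w s p j hm).symm
      · have hwv : (if wBm w s p j then '@' else s.getD j ' ') = s.getD j ' ' := by simp [hw]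
        rw [hwv]
        by_cases hm : s.getD j ' ' = w.getD p ' '
        · have hpj : p ≠ j := by
            intro hEq
            subst hEq
            have hgt : gB w s p = true := by unfold gB; rw [hm]; simp [hp]
            rw [hg] at hgt
            exact Bool.false_ne_true hgt
          rw [if_pos ⟨hpj, hm.symm⟩]
          have hw' : wBm w s p j = false := eq_false_of_ne_true hw
          have hmt : mtcB w s p j = true := by
            unfold mtcB
            rw [hw', hm]
            simp
          refine Prod.ext ?_ ?_ <;> simp only
          · rw [List.any_append]
            simp only [List.any_cons, List.any_nil, hmt, Bool.or_true, Bool.or_false]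
            by_cases hf : (List.range j).any (mtcB w s p) = true
            · simp [hf, List.set_set]
            · simp [hf]
          · rw [set_map_range _ hjs]
            refine List.map_congr_left fun q hq => ?_
            by_cases hqj : q = j
            · subst hqj; simp [hmt, hw]
            · rw [if_neg hqj, cond_step w s p j q (fun h => absurd h hqj)]
        · have hcond : ¬ (p ≠ j ∧ w.getD p ' ' = s.getD j ' ') := by
            rintro ⟨-, h2⟩; exact hm h2.symm
          rw [if_neg hcond]
          have hmf : mtcB w s p j = false := by
            unfold mtcB
            have hb : (s.getD j ' ' == w.getD p ' ') = false := by
              rw [beq_eq_false_iff_ne]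
              exact hm
            rw [hb, Bool.and_false]
          refine Prod.ext ?_ ?_ <;> simp only
          · rw [List.any_append]; simp [hmf]
          · exact (mask_step w s p j hmf).symm
  rw [main s.length le_rfl]
  have hfound : (List.range s.length).any (mtcB w s p) = yB w s p := by
    rw [Bool.eq_iff_iff]
    constructor
    · intro hA
      obtain ⟨q, hq, hmq⟩ := List.any_eq_true.mp hA
      unfold mtcB at hmq
      obtain ⟨hnw, hbeq⟩ := (Bool.and_eq_true _ _).mp hmq
      have hsq : s.getD q ' ' = w.getD p ' ' := by simpa using hbeq
      have hnw' : wBm w s p q = false := by simpa using hnw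
      unfold wBm at hnw'
      obtain ⟨hgq, hoccq⟩ := Bool.or_eq_false_iff.mp hnw'
      unfold yB
      rw [hg]
      have hocc : occB w s (w.getD p ' ') p = false := by rw [← hsq]; exact hoccq
      rw [hocc]
      have hav : availB w s (w.getD p ' ') = true := by
        unfold availB
        refine List.any_eq_true.mpr ⟨q, hq, ?_⟩
        rw [hgq, hsq]
        simp
      rw [hav]
      rfl
    · intro hY
      unfold yB at hY
      obtain ⟨h1, hav⟩ := (Bool.and_eq_true _ _).mp hY
      obtain ⟨-, hnocc⟩ := (Bool.and_eq_true _ _).mp h1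
      have hocc : occB w s (w.getD p ' ') p = false := by simpa using hnocc
      unfold availB at hav
      obtain ⟨q, hq, hq2⟩ := List.any_eq_true.mp hav
      obtain ⟨hgq, hbeq⟩ := (Bool.and_eq_true _ _).mp hq2
      have hsq : s.getD q ' ' = w.getD p ' ' := by simpa using hbeq
      refine List.any_eq_true.mpr ⟨q, hq, ?_⟩
      unfold mtcB wBm
      rw [hsq]
      have hgq' : gB w s q = false := by simpa using hgq
      rw [hgq', hocc]
      simp
  rw [hfound]
  refine Prod.ext ?_ ?_ <;> simp only
  · by_cases hy : yB w s p = true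
    · rw [if_pos (by simp [hy])]
      unfold colSpec
      rw [set_map_range _ hp]
      refine List.map_congr_left fun q hq => ?_
      by_cases hqp : q = p
      · subst hqp; simp [hg, hy]
      · have h2 : (q ≤ p ∧ yB w s q = true) ↔ (q < p ∧ yB w s q = true) := by
          constructor
          · rintro ⟨h1, h3⟩
            refine ⟨?_, h3⟩
            rcases Nat.lt_or_ge q p with h | h
            · exact h
            · exact absurd (by omega : q = p) hqp
          · rintro ⟨h1, h3⟩; exact ⟨by omega, h3⟩
        simp only [hqp, if_false]
        by_cases hgq : gB w s q = true <;> simp [hgq, h2]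
    · rw [if_neg (by simp [hy])]
      unfold colSpec
      refine List.map_congr_left fun q hq => ?_
      have h2 : (q ≤ p ∧ yB w s q = true) ↔ (q < p ∧ yB w s q = true) := by
        constructor
        · rintro ⟨h1, h3⟩
          refine ⟨?_, h3⟩
          rcases Nat.lt_or_ge q p with h | h
          · exact h
          · have : q = p := by omega
            subst this
            exact absurd h3 hy
        · rintro ⟨h1, h3⟩; exact ⟨by omega, h3⟩
      by_cases hgq : gB w s q = true <;> simp [hgq, h2]
  · unfold psSpec
    refine List.map_congr_left fun q hq => ?_
    have hq' : q < s.length := List.mem_range.mp hq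
    have hcond : (wBm w s p q || (decide (q < s.length) && mtcB w s p q))
        = (gB w s q || occB w s (s.getD q ' ') (p+1)) := cond_final w s p q hg hq'
    rw [hcond]

lemma loop2_spec (w s : List Char) (hlen : w.length ≤ s.length) (hat : '@' ∉ w) :
    (List.range w.length).foldl (fun (st : List Char × List Char) p =>
        if st.1.getD p ' ' ≠ 'r' then
          (List.range s.length).foldl (fun (st : List Char × List Char) q =>
              if p ≠ q ∧ w.getD p ' ' = st.2.getD q ' ' then (st.1.set p 'y', st.2.set q '@') else st) st
        else st) (colSpec w s 0, psSpec w s 0)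
      = (colSpec w s w.length, psSpec w s w.length) := by
  have main : ∀ k, k ≤ w.length →
      (List.range k).foldl (fun (st : List Char × List Char) p =>
          if st.1.getD p ' ' ≠ 'r' then
            (List.range s.length).foldl (fun (st : List Char × List Char) q =>
                if p ≠ q ∧ w.getD p ' ' = st.2.getD q ' ' then (st.1.set p 'y', st.2.set q '@') else st) st
          else st) (colSpec w s 0, psSpec w s 0)
        = (colSpec w s k, psSpec w s k) := by
    intro k hk
    induction k with
    | zero => rfl
    | succ k ih =>
      rw [List.range_succ, List.foldl_append, ih (Nat.le_of_succ_le hk)]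
      have hkw : k < w.length := hk
      simp only [List.foldl_cons, List.foldl_nil]
      have hget : (colSpec w s k).getD k ' ' = (if gB w s k then 'r' else 'w') := by
        unfold colSpec
        rw [getD_map_range' hkw]
        by_cases hgk : gB w s k = true
        · simp [hgk]
        · simp [hgk]
      by_cases hgk : gB w s k = true
      · rw [if_neg (by rw [hget, if_pos hgk]; simp)]
        have hyk : yB w s k = false := by unfold yB; rw [hgk]; simp
        refine Prod.ext ?_ ?_ <;> simp only
        · unfold colSpec
          refine List.map_congr_left fun q hq => ?_
          by_cases hgq : gB w s q = true
          · simp [hgq]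
          · rw [if_neg hgq, if_neg hgq]
            refine if_congr ?_ rfl rfl
            constructor
            · rintro ⟨h1, h3⟩; exact ⟨by omega, h3⟩
            · rintro ⟨h1, h3⟩
              refine ⟨?_, h3⟩
              rcases Nat.lt_or_ge q k with h | h
              · exact h
              · have : q = k := by omega
                subst this
                rw [hyk] at h3
                exact absurd h3 Bool.false_ne_true
        · unfold psSpec
          refine List.map_congr_left fun q hq => ?_
          rw [occ_succ, hgk]
          simp
      · rw [if_pos (by rw [hget, if_neg hgk]; simp)]
        exact inner_spec w s hlen hat k hkw (eq_false_of_ne_true hgk)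
  exact main w.length le_rfl

lemma a_eq_codeSpec (word solution : String)
    (hlen : word.toList.length ≤ solution.toList.length) (hat : '@' ∉ word.toList) :
    word_pair_to_int word solution = codeSpec word.toList solution.toList := by
  simp only [word_pair_to_int]
  rw [loop1_spec word.toList solution.toList hlen,
    loop2_spec word.toList solution.toList hlen hat]
  unfold codeSpec
  refine PySem.List.foldl_congr_mem _ _ _ _ ?_
  intro acc pos hpos
  have hpn : pos < word.toList.length := List.mem_range.mp (List.mem_of_mem_drop hpos)
  unfold colSpec digitSpec
  rw [getD_map_range' hpn]
  have hpn' : pos < word.length := by simpa using hpn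
  by_cases hgp : gB word.toList solution.toList pos = true
  · simp [hgp]
  · by_cases hyp : yB word.toList solution.toList pos = true
    · simp [hgp, hyp, hpn']
    · simp [hgp, hyp]

-- ---------- B side ----------

-- partial code after the first k word positions, running power, consumed letters
def codeP (w s : List Char) (k : Nat) : Int :=
  ((List.range k).drop 1).foldl (fun code p => code + digitSpec w s p * 3 ^ (p - 1)) 0
def powV (k : Nat) : Int := if k = 0 then 1 else 3 ^ (k - 1)
def consB (w s : List Char) (c : Char) (k : Nat) : Bool :=
  (List.range k).any (fun p' => yB w s p' && (w.getD p' ' ' == c))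

lemma consB_succ (w s : List Char) (c : Char) (k : Nat) :
    consB w s c (k+1) = (consB w s c k || (yB w s k && (w.getD k ' ' == c))) := by
  unfold consB
  rw [List.range_succ, List.any_append]
  simp

lemma consumed_imp_occ (w s : List Char) (c : Char) (p : Nat) (hc : consB w s c p = true) :
    occB w s c p = true := by
  unfold consB at hc
  obtain ⟨p', hp', h2⟩ := List.any_eq_true.mp hc
  obtain ⟨hy, hbeq⟩ := (Bool.and_eq_true _ _).mp h2
  unfold occB
  refine List.any_eq_true.mpr ⟨p', hp', ?_⟩
  unfold yB at hy
  obtain ⟨h3, -⟩ := (Bool.and_eq_true _ _).mp hy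
  obtain ⟨hng, -⟩ := (Bool.and_eq_true _ _).mp h3
  rw [hng, hbeq]
  rfl

lemma mem_fold_add_if {α : Type} [BEq α] [LawfulBEq α] (l : List (Int × α))
    (P : Int × α → Prop) [DecidablePred P] (acc : PySem.Set α) (x : α) :
    (x ∈ l.foldl (fun acc qc => if P qc then PySem.Set.add acc qc.2 else acc) acc)
      ↔ (x ∈ acc ∨ ∃ qc ∈ l, P qc ∧ x = qc.2) := by
  induction l generalizing acc with
  | nil => simp
  | cons h l ih =>
    simp only [List.foldl_cons]
    by_cases hP : P h
    · rw [if_pos hP, ih]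
      simp only [PySem.Set.mem_add, List.mem_cons]
      constructor
      · rintro ((h1 | h1) | ⟨qc, hqc, h2, h3⟩)
        · exact Or.inl h1
        · exact Or.inr ⟨h, Or.inl rfl, hP, h1⟩
        · exact Or.inr ⟨qc, Or.inr hqc, h2, h3⟩
      · rintro (h1 | ⟨qc, (rfl | hqc), h2, h3⟩)
        · exact Or.inl (Or.inl h1)
        · exact Or.inl (Or.inr h3)
        · exact Or.inr ⟨qc, hqc, h2, h3⟩
    · rw [if_neg hP, ih]
      constructor
      · rintro (h1 | ⟨qc, hqc, h2, h3⟩)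
        · exact Or.inl h1
        · exact Or.inr ⟨qc, List.mem_cons_of_mem _ hqc, h2, h3⟩
      · rintro (h1 | ⟨qc, hqc, h2, h3⟩)
        · exact Or.inl h1
        · rcases List.mem_cons.mp hqc with rfl | hqc'
          · exact absurd h2 hP
          · exact Or.inr ⟨qc, hqc', h2, h3⟩

lemma avail_contains (w s : List Char) (c : Char) :
    PySem.Set.contains
      ((PySem.List.enumerate s).foldl
        (fun (acc : PySem.Set Char) qc =>
          if ¬ (qc.1 < (w.length : Int) ∧ PySem.List.pyGetD w qc.1 ' ' = qc.2) then PySem.Set.add acc qc.2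
          else acc)
        PySem.Set.empty) c = availB w s c := by
  rw [Bool.eq_iff_iff, PySem.Set.contains_iff, mem_fold_add_if]
  unfold availB
  constructor
  · rintro (h1 | ⟨qc, hqc, hcond, rfl⟩)
    · exact absurd h1 (List.not_mem_nil)
    · obtain ⟨k, hk, rfl⟩ := (PySem.List.mem_enumerate_iff s 0 qc).mp hqc
      refine List.any_eq_true.mpr ⟨k, List.mem_range.mpr hk, ?_⟩
      have hg : gB w s k = false := by
        unfold gB
        by_cases hkn : k < w.length
        · simp only [hkn, decide_true, Bool.true_and]
          rw [beq_eq_false_iff_ne]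
          intro hEq
          apply hcond
          refine ⟨by push_cast; omega, ?_⟩
          rw [zero_add, PySem.List.pyGetD_natCast, hEq, List.getD_eq_getElem s ' ' hk]
        · simp [hkn]
      rw [hg, List.getD_eq_getElem s ' ' hk]
      simp
  · intro h
    obtain ⟨k, hk, h2⟩ := List.any_eq_true.mp h
    have hk' : k < s.length := List.mem_range.mp hk
    obtain ⟨hng, hbeq⟩ := (Bool.and_eq_true _ _).mp h2
    have hsq : s.getD k ' ' = c := by simpa using hbeq
    have hgk : gB w s k = false := by simpa using hng
    refine Or.inr ⟨((0 : Int) + k, s[k]), (PySem.List.mem_enumerate_iff s 0 _).mpr ⟨k, hk', rfl⟩, ?_, ?_⟩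
    · rintro ⟨hlt, hEq⟩
      rw [zero_add, PySem.List.pyGetD_natCast] at hEq
      have hkn : k < w.length := by exact_mod_cast (by simpa using hlt)
      unfold gB at hgk
      rw [List.getD_eq_getElem s ' ' hk'] at hsq
      simp only [hkn, decide_true, Bool.true_and, beq_eq_false_iff_ne] at hgk
      exact hgk (by rw [hEq, List.getD_eq_getElem s ' ' hk'])
    · rw [← hsq, List.getD_eq_getElem s ' ' hk']

lemma occ_imp_consumed (w s : List Char) (c : Char) (hav : availB w s c = true) (p : Nat)
    (hocc : occB w s c p = true) :
    (List.range p).any (fun p' => yB w s p' && (w.getD p' ' ' == c)) = true := by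
  induction p with
  | zero => simp [occB] at hocc
  | succ p ih =>
    rw [occ_succ] at hocc
    rw [List.range_succ, List.any_append]
    rcases (Bool.or_eq_true _ _).mp hocc with h | h
    · rw [ih h]
      rfl
    · obtain ⟨hng, hbeq⟩ := (Bool.and_eq_true _ _).mp h
      by_cases hoccp : occB w s c p = true
      · rw [ih hoccp]
        rfl
      · have hc : w.getD p ' ' = c := by simpa using hbeq
        have hgp : gB w s p = false := by simpa using hng
        have hyp : yB w s p = true := by
          unfold yB
          rw [hc, hgp, eq_false_of_ne_true hoccp, hav]
          rfl
        have hsingle : (List.any [p] fun p' => yB w s p' && (w.getD p' ' ' == c)) = true := by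
          simp only [List.any_cons, List.any_nil, Bool.or_false]
          rw [hyp, hbeq]
          rfl
        rw [hsingle, Bool.or_true]

lemma step_tuple3 (w s : List Char) (k : Nat) (K : PySem.Set Char) :
    (if 1 ≤ k then (codeP w s k + digitSpec w s k * powV k, powV k * 3, K)
     else (codeP w s k, powV k, K)) = (codeP w s (k+1), powV (k+1), K) := by
  by_cases hk0 : k = 0
  · subst hk0
    norm_num [codeP, powV]
  · rw [if_pos (Nat.one_le_iff_ne_zero.mpr hk0)]
    have hcp : codeP w s (k+1) = codeP w s k + digitSpec w s k * 3 ^ (k-1) := by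
      unfold codeP
      rw [List.range_succ, List.drop_append_of_le_length (by simp; omega), List.foldl_append]
      simp
    have hpw : powV k = 3 ^ (k-1) := by unfold powV; rw [if_neg hk0]
    have hpw2 : powV (k+1) = 3 ^ k := by unfold powV; simp
    rw [hcp, hpw, hpw2]
    refine Prod.ext rfl (Prod.ext ?_ rfl)
    show (3 : Int) ^ (k-1) * 3 = 3 ^ k
    rw [← pow_succ]
    congr 1
    omega

lemma b_eq_codeSpec (word solution : String) :
    word_pair_to_int_alt word solution = codeSpec word.toList solution.toList := by
  simp only [word_pair_to_int_alt]
  set w := word.toList with hw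
  set s := solution.toList with hs
  set avail := (PySem.List.enumerate s).foldl
      (fun (acc : PySem.Set Char) qc =>
        if ¬ (qc.1 < (w.length : Int) ∧ PySem.List.pyGetD w qc.1 ' ' = qc.2) then PySem.Set.add acc qc.2
        else acc)
      PySem.Set.empty with hA
  have hav : ∀ c, PySem.Set.contains avail c = availB w s c := fun c => by
    rw [hA]; exact avail_contains w s c
  rw [PySem.List.enumerate_eq_map_pyRange w ' ', PySem.List.pyRange_one, List.foldl_map, List.foldl_map]
  have hlw : ((PySem.List.len w - 0).toNat) = w.length := by
    simp [PySem.List.len]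
  rw [hlw]
  rw [PySem.List.foldl_congr_mem (List.range w.length) _
    (fun (st : Int × Int × PySem.Set Char) (p : Nat) =>
      let t : Int × PySem.Set Char :=
        if w.getD p ' ' = s.getD p ' ' then (2, st.2.2)
        else if PySem.Set.contains avail (w.getD p ' ') ∧ ¬ PySem.Set.contains st.2.2 (w.getD p ' ') then
          (1, PySem.Set.add st.2.2 (w.getD p ' '))
        else (0, st.2.2)
      if 1 ≤ p then (st.1 + t.1 * st.2.1, st.2.1 * 3, t.2) else (st.1, st.2.1, t.2))
    ((0 : Int), (1 : Int), (PySem.Set.empty : PySem.Set Char))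
    (fun acc x hx => by
      simp only [zero_add, PySem.List.pyGetD_natCast, Nat.one_le_cast])]
  have main : ∀ k, k ≤ w.length →
      ∃ K : PySem.Set Char,
        (List.range k).foldl
          (fun (st : Int × Int × PySem.Set Char) (p : Nat) =>
            let t : Int × PySem.Set Char :=
              if w.getD p ' ' = s.getD p ' ' then (2, st.2.2)
              else if PySem.Set.contains avail (w.getD p ' ') ∧ ¬ PySem.Set.contains st.2.2 (w.getD p ' ') then
                (1, PySem.Set.add st.2.2 (w.getD p ' '))
              else (0, st.2.2)
            if 1 ≤ p then (st.1 + t.1 * st.2.1, st.2.1 * 3, t.2) else (st.1, st.2.1, t.2))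
          ((0 : Int), (1 : Int), (PySem.Set.empty : PySem.Set Char))
        = (codeP w s k, powV k, K) ∧ (∀ c, PySem.Set.contains K c = consB w s c k) := by
    intro k hk
    induction k with
    | zero =>
      refine ⟨PySem.Set.empty, ?_, fun c => by simp [consB, PySem.Set.contains, PySem.Set.empty]⟩
      simp [codeP, powV]
    | succ k ih =>
      obtain ⟨K, hfold, hK⟩ := ih (Nat.le_of_succ_le hk)
      have hkn : k < w.length := hk
      rw [List.range_succ, List.foldl_append, hfold]
      simp only [List.foldl_cons, List.foldl_nil]
      by_cases hg : w.getD k ' ' = s.getD k ' '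
      · have hgB : gB w s k = true := by unfold gB; rw [hg]; simp [hkn]
        have hy0 : yB w s k = false := by unfold yB; rw [hgB]; simp
        have hdig : digitSpec w s k = 2 := by unfold digitSpec; rw [hgB]; rfl
        refine ⟨K, ?_, fun c => by rw [consB_succ, hy0, hK]; simp⟩
        rw [if_pos hg, ← hdig]
        exact step_tuple3 w s k K
      · have hgB : gB w s k = false := by
          unfold gB
          rw [beq_eq_false_iff_ne.mpr hg]
          simp
        by_cases hc2 : PySem.Set.contains avail (w.getD k ' ') = true ∧ ¬ PySem.Set.contains K (w.getD k ' ') = true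
        · have hA2 : availB w s (w.getD k ' ') = true := by rw [← hav]; exact hc2.1
          have hC2 : consB w s (w.getD k ' ') k = false := by
            rw [← hK]; exact eq_false_of_ne_true hc2.2
          have hocc : occB w s (w.getD k ' ') k = false := by
            by_cases ho : occB w s (w.getD k ' ') k = true
            · have := occ_imp_consumed w s (w.getD k ' ') hA2 k ho
              unfold consB at hC2
              rw [this] at hC2
              exact absurd hC2 (by decide)
            · exact eq_false_of_ne_true ho
          have hy1 : yB w s k = true := by unfold yB; rw [hgB, hocc, hA2]; rfl
          have hdig : digitSpec w s k = 1 := by unfold digitSpec; rw [hgB, hy1]; rfl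
          refine ⟨PySem.Set.add K (w.getD k ' '), ?_, fun c => ?_⟩
          · rw [if_neg hg, if_pos hc2, ← hdig]
            exact step_tuple3 w s k _
          · rw [consB_succ, Bool.eq_iff_iff, PySem.Set.contains_iff, PySem.Set.mem_add]
            rw [Bool.or_eq_true, hy1]
            simp only [Bool.true_and, beq_iff_eq]
            rw [← PySem.Set.contains_iff, hK]
            constructor
            · rintro (h | h)
              · exact Or.inl h
              · exact Or.inr h.symm
            · rintro (h | h)
              · exact Or.inl h
              · exact Or.inr h.symm
        · have hy0 : yB w s k = false := by
            by_cases hA2 : availB w s (w.getD k ' ') = true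
            · have hC2 : consB w s (w.getD k ' ') k = true := by
                by_cases hcc : PySem.Set.contains K (w.getD k ' ') = true
                · rw [← hK]; exact hcc
                · exact absurd ⟨by rw [hav]; exact hA2, hcc⟩ hc2
              have hocc := consumed_imp_occ w s (w.getD k ' ') k hC2
              unfold yB
              rw [hocc]
              simp
            · unfold yB
              rw [eq_false_of_ne_true hA2]
              simp
          have hdig : digitSpec w s k = 0 := by unfold digitSpec; rw [hgB, hy0]; rfl
          refine ⟨K, ?_, fun c => by rw [consB_succ, hy0, hK]; simp⟩
          rw [if_neg hg, if_neg hc2, ← hdig]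
          exact step_tuple3 w s k K
  obtain ⟨K, hfold, -⟩ := main w.length le_rfl
  rw [hfold]
  rfl

-- ===== VERDICT (by name: the statement is the Claim_ definition above) =====
theorem word_pair_to_int_spec : Claim_equal_word_pair_to_int := by
  intro word solution _ hpre
  unfold Spec_word_pair_to_int
  rw [a_eq_codeSpec word solution hpre.1 hpre.2, b_eq_codeSpec word solution]
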